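-- pv_equiv track=rewrite | github.com/istoker/AdventOfCode2017 | Day6-2.py | reallocate_blocks
-- ===== SOURCE A (Python) =====
-- def spread_even_number_of_blocks(banks, remaining_blocks):
--     number_to_spread = remaining_blocks // len(banks)
--     banks = [elem + number_to_spread for elem in banks]
--     remaining_blocks -= number_to_spread * len(banks)
--     return banks, remaining_blocks
--
-- def reallocate_blocks(banks):
--     remaining_blocks = max(banks)
--     index = banks.index(max(banks))
--     banks[index] = 0
--     index += 1
--     banks, remaining_blocks = spread_even_number_of_blocks(banks, remaining_blocks)
--     while remaining_blocks != 0: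
--         if index >= len(banks):
--             index = 0
--         banks[index] += 1
--         remaining_blocks -= 1
--         index += 1
--     return banks
-- ===== SOURCE B (Python) =====
-- def reallocate_blocks(banks):
--     n = len(banks)
--     m = max(banks)
--     idx = banks.index(m)
--     banks[idx] = 0  # same in-place mutation of the argument as the original
--     base, extra = divmod(m, n)
--     return [banks[j] + base + (1 if (j - idx - 1) % n < extra else 0) for j in range(n)]
-- ===== Notes on version B (the rewrite author's own statement) =====
-- stated objective: simpler
-- what changed: Replaces the one-block-at-a-time while loop with a closed form: divmod(max, n) gives the even share and the remainder, and a single comprehension adds the share everywhere plus 1 on the wrap-around window of `extra` positions after the emptied bank.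
-- outside the precondition, e.g. on reallocate_blocks([]): A raises ValueError, B raises ValueError
import Mathlib
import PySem

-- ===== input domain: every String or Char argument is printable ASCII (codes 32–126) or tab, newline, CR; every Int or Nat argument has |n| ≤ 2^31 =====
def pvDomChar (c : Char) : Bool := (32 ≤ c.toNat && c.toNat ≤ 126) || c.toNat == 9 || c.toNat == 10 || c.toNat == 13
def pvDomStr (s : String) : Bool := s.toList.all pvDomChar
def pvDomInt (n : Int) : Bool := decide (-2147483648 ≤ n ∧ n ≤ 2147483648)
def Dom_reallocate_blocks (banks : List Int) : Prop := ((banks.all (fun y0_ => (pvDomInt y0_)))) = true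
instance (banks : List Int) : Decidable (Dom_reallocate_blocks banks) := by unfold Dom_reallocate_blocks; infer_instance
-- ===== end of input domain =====

-- B replaces A's one-block-at-a-time distribution loop by a divmod closed form built in one pass.
-- Both Pythons mutate the argument list identically (the first maximal bank is set to 0); the
-- equivalence proved here is about the RETURN value.

-- ===== PORT A =====
-- the 'while remaining_blocks != 0' loop of A; the 'remaining < 0' guard only makes the
-- recursion total (Python would loop forever there; unreachable: remaining = max % n ≥ 0)
def pyLoopA (banks : List Int) (remaining : Int) (index : Int) : List Int :=
  if remaining = 0 then banks
  else if remaining < 0 then banks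
  else
    let index' : Int := if index ≥ (banks.length : Int) then 0 else index
    pyLoopA (PySem.List.pySetD banks index' (PySem.List.pyGetD banks index' 0 + 1))
      (remaining - 1) (index' + 1)
termination_by remaining.toNat
decreasing_by omega

def spread_even_number_of_blocks (banks : List Int) (remaining_blocks : Int) : List Int × Int :=
  let number_to_spread := PySem.Int.floordiv remaining_blocks (banks.length : Int)
  let banks' := banks.map (fun elem => elem + number_to_spread)
  (banks', remaining_blocks - number_to_spread * (banks'.length : Int))

def reallocate_blocks (banks : List Int) : List Int :=
  match PySem.List.max? banks (fun x => x) with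
  | none => []   -- max([]) raises ValueError; excluded by Pre_
  | some m =>
    let index : Int := ((PySem.List.index? banks m).getD 0 : Nat)
    let banks1 := PySem.List.pySetD banks index 0
    let index2 := index + 1
    let p := spread_even_number_of_blocks banks1 m
    pyLoopA p.1 p.2 index2

-- ===== PORT B =====
def reallocate_blocks_alt (banks : List Int) : List Int :=
  match PySem.List.max? banks (fun x => x) with
  | none => []   -- max([]) raises ValueError; excluded by Pre_
  | some m =>
    let n : Int := (banks.length : Int)
    let idx : Int := ((PySem.List.index? banks m).getD 0 : Nat)
    let banks0 := PySem.List.pySetD banks idx 0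
    let base := PySem.Int.floordiv m n
    let extra := PySem.Int.mod m n
    (PySem.List.pyRange 0 n 1).map (fun j =>
      PySem.List.pyGetD banks0 j 0 + base +
        (if PySem.Int.mod (j - idx - 1) n < extra then 1 else 0))

-- ===== PRECONDITION & SPEC =====
-- Pre_ excludes only the empty list, on which Python's max([]) raises ValueError.
def Pre_reallocate_blocks (banks : List Int) : Prop := banks ≠ []
instance (banks : List Int) : Decidable (Pre_reallocate_blocks banks) := by
  unfold Pre_reallocate_blocks; infer_instance
def pvWitness_reallocate_blocks : List Int := [0, 2, 7, 0]

def Spec_reallocate_blocks (banks : List Int) (out : List Int) : Prop := out = reallocate_blocks_alt banks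
instance (banks : List Int) (out : List Int) : Decidable (Spec_reallocate_blocks banks out) := by unfold Spec_reallocate_blocks; infer_instance

-- ===== CLAIM (what is proved, stated in full; the proofs are below) =====
def Claim_equal_reallocate_blocks : Prop := ∀ (banks : List Int), Dom_reallocate_blocks banks → Pre_reallocate_blocks banks → Spec_reallocate_blocks banks (reallocate_blocks banks)

-- ===== LEMMAS AND PROOFS =====

theorem pv_emod_small (a n : Int) (h1 : -n ≤ a) (h2 : a < n) :
    a % n = if a < 0 then a + n else a := by
  split_ifs with h
  · rw [← Int.add_mul_emod_self_left (b := n) (c := 1), mul_one]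
    exact Int.emod_eq_of_lt (by omega) (by omega)
  · exact Int.emod_eq_of_lt (by omega) h2

theorem pv_hit_step (n i0 p j r : Int) (_hn : 0 < n) (hj : 0 ≤ j) (hjn : j < n)
    (hi0 : 0 ≤ i0) (hi : i0 ≤ n) (hp1 : 0 ≤ p) (hp2 : p < n)
    (hcase : p = i0 ∨ (i0 = n ∧ p = 0))
    (hr : 0 ≤ r) (hrn : r + 1 ≤ n) :
    (if j = p then (1:Int) else 0) + (if (j - (p + 1)) % n < r then (1:Int) else 0)
      = (if (j - i0) % n < r + 1 then 1 else 0) := by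
  rw [pv_emod_small (j - (p + 1)) n (by omega) (by omega),
      pv_emod_small (j - i0) n (by omega) (by omega)]
  split_ifs <;> omega

theorem pyLoopA_eq (n : Nat) (_hn : 0 < n) :
    ∀ (r : Nat) (l : List Int) (i0 : Nat), l.length = n → i0 ≤ n → r ≤ n →
      pyLoopA l (r : Int) (i0 : Int) =
        (List.range n).map (fun j =>
          l.getD j 0 + (if ((j : Int) - (i0 : Int)) % (n : Int) < (r : Int) then 1 else 0)) := by
  intro r
  induction r with
  | zero =>
    intro l i0 hl _ _
    rw [show ((0 : Nat) : Int) = 0 from rfl, pyLoopA, if_pos rfl]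
    have : ∀ j ∈ List.range n, l.getD j 0 +
        (if ((j : Int) - (i0 : Int)) % (n : Int) < (0 : Int) then (1:Int) else 0) = l.getD j 0 := by
      intro j _
      have := Int.emod_nonneg ((j : Int) - (i0 : Int)) (by omega : (n : Int) ≠ 0)
      rw [if_neg (by omega)]; ring
    rw [List.map_congr_left this]
    apply List.ext_getElem
    · simp [hl]
    · intro j h1 h2
      simp only [List.getElem_map, List.getElem_range]
      exact (List.getD_eq_getElem l 0 (by omega)).symm
  | succ r ih =>
    intro l i0 hl hi0 hr
    rw [pyLoopA]
    rw [if_neg (by push_cast; omega), if_neg (by push_cast; omega)]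
    rw [show ((r + 1 : Nat) : Int) - 1 = ((r : Nat) : Int) by push_cast; ring]
    set p : Nat := if i0 ≥ n then 0 else i0 with hpdef
    have hpn : p < n := by simp only [hpdef]; split_ifs <;> omega
    have hidx : (if (i0 : Int) ≥ (l.length : Int) then (0:Int) else (i0 : Int)) = (p : Nat) := by
      simp only [hpdef, hl]
      split_ifs with h1 h2 h2 <;> push_cast <;> omega
    simp only [hidx, PySem.List.pySetD_natCast, PySem.List.pyGetD_natCast]
    have hstep := ih (l.set p (l.getD p 0 + 1)) (p + 1)
      (by simp [hl]) (by omega) (by omega)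
    rw [show ((p : Nat) : Int) + 1 = ((p + 1 : Nat) : Int) by push_cast; ring, hstep]
    apply List.map_congr_left
    intro j hj
    rw [List.mem_range] at hj
    have hget : (l.set p (l.getD p 0 + 1)).getD j 0 =
        (if j = p then l.getD p 0 + 1 else l.getD j 0) := by
      rw [List.getD_eq_getElem _ 0 (by simp [hl]; omega), List.getElem_set]
      split_ifs with h1 h2 h2
      · omega
      · omega
      · omega
      · exact (List.getD_eq_getElem l 0 (by omega)).symm
    rw [hget]
    have hcaseN : p = i0 ∨ (i0 = n ∧ p = 0) := by
      simp only [hpdef]; split_ifs <;> omega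
    have harith := pv_hit_step (n : Int) (i0 : Int) (p : Int) (j : Int) (r : Int)
      (by omega) (by omega) (by omega) (by omega) (by omega) (by omega) (by omega)
      (by omega) (by omega) (by omega)
    push_cast at harith ⊢
    by_cases hjp : j = p
    · subst hjp
      rw [if_pos rfl] at harith
      rw [if_pos rfl]
      split_ifs at harith ⊢ <;> omega
    · rw [if_neg (by omega : ¬((j : Int) = (p : Int)))] at harith
      rw [if_neg hjp]
      split_ifs at harith ⊢ <;> omega

-- ===== VERDICT (by name: the statement is the Claim_ definition above) =====
theorem reallocate_blocks_spec : Claim_equal_reallocate_blocks := by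
  intro banks _ hpre
  unfold Spec_reallocate_blocks reallocate_blocks reallocate_blocks_alt
  obtain ⟨m, hm⟩ : ∃ m, PySem.List.max? banks (fun x => x) = some m := by
    cases h : PySem.List.max? banks (fun x => x) with
    | none => rw [PySem.List.max?_eq_none_iff] at h; exact absurd h hpre
    | some m => exact ⟨m, rfl⟩
  rw [hm]
  have hmem : m ∈ banks := PySem.List.max?_mem hm
  obtain ⟨idx, hidx⟩ : ∃ k, PySem.List.index? banks m = some k := by
    cases h : PySem.List.index? banks m with
    | none => rw [PySem.List.index?_eq_none_iff] at h; exact absurd hmem h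
    | some k => exact ⟨k, rfl⟩
  obtain ⟨hk, -, -⟩ := PySem.List.getElem_of_index?_eq_some hidx
  simp only [hidx, Option.getD_some, spread_even_number_of_blocks,
    PySem.List.pySetD_natCast, List.length_set, List.length_map]
  set n := banks.length with hndef
  have hn : 0 < n := by omega
  have hq := PySem.Int.floordiv_mul_add_mod m (n : Int)
  have h0 : 0 ≤ PySem.Int.mod m (n : Int) := PySem.Int.mod_nonneg m (by omega)
  have h1 : PySem.Int.mod m (n : Int) < (n : Int) := PySem.Int.mod_lt m (by omega)
  set r : Nat := (PySem.Int.mod m (n : Int)).toNat with hrdef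
  have hremr : m - PySem.Int.floordiv m (n : Int) * (n : Int) = ((r : Nat) : Int) := by omega
  rw [hremr, show ((idx : Nat) : Int) + 1 = ((idx + 1 : Nat) : Int) by push_cast; ring]
  rw [pyLoopA_eq n hn r _ (idx + 1) (by simp [hndef]) (by omega) (by omega)]
  have hrange : PySem.List.pyRange 0 (n : Int) 1 = (List.range n).map (fun k : Nat => (k : Int)) := by
    rw [PySem.List.pyRange_one]
    simp only [sub_zero, Int.toNat_natCast, zero_add]
  rw [hrange, List.map_map]
  apply List.map_congr_left
  intro j hj
  rw [List.mem_range] at hj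
  simp only [Function.comp, PySem.List.pyGetD_natCast]
  have hgm : ((banks.set idx 0).map
      (fun elem => elem + PySem.Int.floordiv m (n : Int))).getD j 0 =
      (banks.set idx 0).getD j 0 + PySem.Int.floordiv m (n : Int) := by
    rw [List.getD_eq_getElem _ 0 (by simp; omega), List.getElem_map,
      ← List.getD_eq_getElem _ 0 (by simp; omega)]
  have hmodeq : PySem.Int.mod ((j : Int) - (idx : Int) - 1) (n : Int) =
      ((j : Int) - ((idx + 1 : Nat) : Int)) % (n : Int) := by
    rw [PySem.Int.mod_eq_emod_of_pos (by omega)]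
    congr 1; push_cast; ring
  have hextra : PySem.Int.mod m (n : Int) = ((r : Nat) : Int) := by omega
  rw [hgm, hmodeq, hextra]
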